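-- pv_equiv track=rewrite | github.com/hicsail/zk-NLP | testcase-generation/substring_search/common/util.py | integer_to_word
-- ===== SOURCE A (Python) =====
-- def integer_to_word(integer):
--     word=""
--     bit = (1<<8)-1
--     while integer>0:
--         bit_char = integer&bit
--         integer=integer>>8
--         char=chr(bit_char)
--         word+=char
--     return word
-- ===== SOURCE B (Python) =====
-- def integer_to_word(integer):
--     if integer < 0:
--         return ""
--     n = (integer.bit_length() + 7) // 8
--     return integer.to_bytes(n, 'little').decode('latin-1')
-- ===== Notes on version B (the rewrite author's own statement) =====
-- stated objective: idiomatic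
-- what changed: Replaced the accumulate-while-shifting loop with a closed form: compute the byte length from bit_length and decode the little-endian to_bytes representation via latin-1, with no explicit loop.
import Mathlib
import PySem

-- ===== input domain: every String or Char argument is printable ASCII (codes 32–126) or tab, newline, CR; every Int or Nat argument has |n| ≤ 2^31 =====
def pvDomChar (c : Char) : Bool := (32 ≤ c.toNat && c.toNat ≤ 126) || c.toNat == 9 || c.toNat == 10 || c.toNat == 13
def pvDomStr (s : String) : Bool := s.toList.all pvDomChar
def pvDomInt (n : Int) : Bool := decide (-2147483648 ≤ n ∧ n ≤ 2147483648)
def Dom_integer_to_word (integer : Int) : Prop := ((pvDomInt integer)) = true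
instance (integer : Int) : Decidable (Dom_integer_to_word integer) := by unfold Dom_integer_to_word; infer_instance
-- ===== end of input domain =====

-- B replaces A's byte-accumulating while loop by a closed form (byte length from the
-- bit length, then the little-endian bytes decoded latin-1); same value everywhere.

-- ===== PORT A =====
-- A's while loop, carried on the Nat value of `integer`: exact, since the Python loop
-- body runs only while integer > 0 (for integer ≤ 0, toNat = 0 and the loop exits at once)
def integer_to_word_go (m : Nat) (word : String) : String :=
  if m > 0 then
    integer_to_word_go (m >>> 8) (word.push (Char.ofNat (m &&& 255)))
  else word
termination_by m
decreasing_by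
  simp only [Nat.shiftRight_eq_div_pow]
  exact Nat.div_lt_self (by omega) (by norm_num)

def integer_to_word (integer : Int) : String :=
  integer_to_word_go integer.toNat ""

-- ===== PORT B =====
-- Source B: guard negatives; n = (bit_length+7)//8; to_bytes(n,'little').decode('latin-1'),
-- i.e. the n little-endian bytes as chars. pvBitLength is Python's int.bit_length on Nat.
def pvBitLength (m : Nat) : Nat :=
  if m = 0 then 0 else pvBitLength (m / 2) + 1
termination_by m
decreasing_by exact Nat.div_lt_self (by omega) (by norm_num)

def integer_to_word_alt (integer : Int) : String :=
  if integer < 0 then ""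
  else
    String.ofList ((List.range ((pvBitLength integer.toNat + 7) / 8)).map
      (fun i => Char.ofNat ((integer.toNat >>> (8 * i)) % 256)))

-- ===== PRECONDITION & SPEC =====
def Spec_integer_to_word (integer : Int) (out : String) : Prop := out = integer_to_word_alt integer
instance (integer : Int) (out : String) : Decidable (Spec_integer_to_word integer out) := by unfold Spec_integer_to_word; infer_instance

-- ===== CLAIM (what is proved, stated in full; the proofs are below) =====
def Claim_equal_integer_to_word : Prop := ∀ (integer : Int), Dom_integer_to_word integer → Spec_integer_to_word integer (integer_to_word integer)

-- ===== LEMMAS AND PROOFS =====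

-- the little-endian byte-characters of m, as both programs produce them
def pvBChars (m : Nat) : List Char :=
  if m = 0 then [] else Char.ofNat (m % 256) :: pvBChars (m / 256)
termination_by m
decreasing_by exact Nat.div_lt_self (by omega) (by norm_num)

theorem pv_go_eq (m : Nat) : ∀ word : String,
    integer_to_word_go m word = word ++ String.ofList (pvBChars m) := by
  induction m using Nat.strong_induction_on with
  | _ m ih =>
    intro word
    rw [integer_to_word_go, pvBChars]
    by_cases h : m = 0
    · simp [h]
    · have hm : 0 < m := Nat.pos_of_ne_zero h
      have hlt : m >>> 8 < m := by
        simp only [Nat.shiftRight_eq_div_pow]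
        exact Nat.div_lt_self hm (by norm_num)
      simp only [hm, if_pos, h, if_neg, not_false_iff]
      rw [ih _ hlt]
      have hb : m &&& 255 = m % 256 := by
        have h255 : (255 : Nat) = 2 ^ 8 - 1 := by norm_num
        rw [h255, Nat.and_two_pow_sub_one_eq_mod]
      have hs : m >>> 8 = m / 256 := by
        simp [Nat.shiftRight_eq_div_pow]
      rw [hb, hs, ← String.toList_inj]
      simp

theorem pv_bl_upper (m : Nat) : m < 2 ^ pvBitLength m := by
  induction m using Nat.strong_induction_on with
  | _ m ih =>
    rw [pvBitLength]
    by_cases h : m = 0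
    · simp [h]
    · have := ih (m / 2) (Nat.div_lt_self (Nat.pos_of_ne_zero h) one_lt_two)
      rw [if_neg h, pow_succ]
      omega

theorem pv_bl_lower (m : Nat) : 0 < m → 2 ^ (pvBitLength m - 1) ≤ m := by
  induction m using Nat.strong_induction_on with
  | _ m ih =>
    intro hm
    rw [pvBitLength, if_neg (Nat.pos_iff_ne_zero.mp hm), Nat.add_sub_cancel]
    by_cases h2 : m / 2 = 0
    · rw [h2, pvBitLength]
      simpa using hm
    · have hp : 0 < m / 2 := Nat.pos_of_ne_zero h2
      have hb : 0 < pvBitLength (m / 2) := by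
        rw [pvBitLength, if_neg h2]; omega
      have hih := ih (m / 2) (Nat.div_lt_self hm one_lt_two) hp
      have e : (2 : Nat) ^ pvBitLength (m / 2) = 2 ^ (pvBitLength (m / 2) - 1) * 2 := by
        rw [← pow_succ]; congr 1; omega
      omega

theorem pv_bl_eq_size (m : Nat) : pvBitLength m = Nat.size m := by
  by_cases h : m = 0
  · subst h
    rw [pvBitLength]
    simp [Nat.size_zero]
  · have hm : 0 < m := Nat.pos_of_ne_zero h
    have hb : 0 < pvBitLength m := by rw [pvBitLength, if_neg h]; omega
    apply le_antisymm
    · have := Nat.lt_size.mpr (pv_bl_lower m hm)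
      omega
    · exact Nat.size_le.mpr (pv_bl_upper m)

theorem pv_size_div (m : Nat) (hm : 0 < m) :
    (Nat.size m + 7) / 8 = (Nat.size (m / 256) + 7) / 8 + 1 := by
  by_cases h256 : m < 256
  · have h1 : Nat.size m ≤ 8 := Nat.size_le.mpr (by norm_num; omega)
    have h2 : m / 256 = 0 := Nat.div_eq_of_lt h256
    have h3 : 0 < Nat.size m := Nat.size_pos.mpr hm
    rw [h2, Nat.size_zero]; omega
  · have h9 : 8 < Nat.size m := Nat.lt_size.mpr (by norm_num; omega)
    have hself : m < 2 ^ Nat.size m := Nat.lt_size_self m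
    have hq : Nat.size (m / 256) = Nat.size m - 8 := by
      apply le_antisymm
      · apply Nat.size_le.mpr
        have e : (2 : Nat) ^ Nat.size m = 2 ^ (Nat.size m - 8) * 256 := by
          rw [show (256 : Nat) = 2 ^ 8 by norm_num, ← pow_add]
          congr 1; omega
        omega
      · have hlt2 : m / 256 < 2 ^ Nat.size (m / 256) := Nat.lt_size_self _
        have key : m < 2 ^ (Nat.size (m / 256) + 8) := by
          have e : (2 : Nat) ^ (Nat.size (m / 256) + 8) = 2 ^ Nat.size (m / 256) * 256 := by
            rw [pow_add]; norm_num
          omega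
        have := Nat.size_le.mpr key
        omega
    rw [hq]; omega

theorem pv_map_range_shift (g : Nat → Char) (n : Nat) :
    List.map g (List.range (n + 1)) = g 0 :: List.map (fun i => g (i + 1)) (List.range n) := by
  simp [List.range_succ_eq_map, Function.comp_def]

theorem pv_range_eq (m : Nat) :
    (List.range ((Nat.size m + 7) / 8)).map
      (fun i => Char.ofNat ((m >>> (8 * i)) % 256)) = pvBChars m := by
  induction m using Nat.strong_induction_on with
  | _ m ih =>
    rw [pvBChars]
    by_cases h : m = 0
    · simp [h, Nat.size_zero]
    · have hm : 0 < m := Nat.pos_of_ne_zero h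
      have hdiv : m / 256 < m := Nat.div_lt_self hm (by norm_num)
      rw [if_neg h, pv_size_div m hm, pv_map_range_shift]
      refine List.cons_eq_cons.mpr ⟨by simp, ?_⟩
      rw [← ih _ hdiv]
      apply List.map_congr_left
      intro i _
      have hsh : m >>> (8 * (i + 1)) = (m / 256) >>> (8 * i) := by
        rw [show 8 * (i + 1) = 8 + 8 * i by ring, Nat.shiftRight_add]
        congr 1
        simp [Nat.shiftRight_eq_div_pow]
      rw [hsh]

-- ===== VERDICT (by name: the statement is the Claim_ definition above) =====
theorem integer_to_word_spec : Claim_equal_integer_to_word := by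
  intro integer _
  unfold Spec_integer_to_word integer_to_word integer_to_word_alt
  rw [pv_go_eq]
  by_cases h : integer < 0
  · have h0 : integer.toNat = 0 := Int.toNat_of_nonpos (le_of_lt h)
    rw [if_pos h, h0, pvBChars]
    simp
  · rw [if_neg h, pv_bl_eq_size, pv_range_eq]
    simp
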